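-- pv_equiv track=rewrite | github.com/sjogleka/General_codes | Gateway_Throttling.py | droppedRequest
-- ===== SOURCE A (Python) =====
-- def droppedRequest(RequestTime):
--     D = {}
--     drop_count = 0
--     for i in RequestTime:
--         if i in D:
--             D[i] += 1
--         else:
--             D[i] = 1
--         drop_count = 0
--         time = [i for i in D]
--         time = sorted(time)
--         for i in time:
--             drop_count += max(D[i]-3,0)
--             drop_count += max(sum([D[i] for i in range(max(min(time),i-9),i+1) if i in D])-20,0)
--             drop_count += max(sum([D[i] for i in range(max(min(time),i-59),i+1) if i in D])-60,0)
--     return drop_count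
-- ===== SOURCE B (Python) =====
-- def droppedRequest(RequestTime):
--     # One pass to build counts, then a single aggregation over the sorted
--     # distinct times with bounded backward window scans (A recomputes the
--     # whole aggregation after every request).
--     cnt = {}
--     for t in RequestTime:
--         cnt[t] = cnt.get(t, 0) + 1
--     times = sorted(cnt)
--     counts = [cnt[t] for t in times]
--     total = 0
--     for idx in range(len(times)):
--         t = times[idx]
--         total += max(counts[idx] - 3, 0)
--         s = 0
--         k = idx
--         while k >= 0 and times[k] >= t - 9:
--             s += counts[k]
--             k -= 1
--         total += max(s - 20, 0)
--         s = 0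
--         k = idx
--         while k >= 0 and times[k] >= t - 59:
--             s += counts[k]
--             k -= 1
--         total += max(s - 60, 0)
--     return total
-- ===== Notes on version B (the rewrite author's own statement) =====
-- stated objective: faster
-- what changed: B builds the count dict in one pass and computes the window aggregation once over the sorted distinct times with bounded backward scans, instead of A's re-sorting and re-summing every window after every single request.
import Mathlib
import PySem

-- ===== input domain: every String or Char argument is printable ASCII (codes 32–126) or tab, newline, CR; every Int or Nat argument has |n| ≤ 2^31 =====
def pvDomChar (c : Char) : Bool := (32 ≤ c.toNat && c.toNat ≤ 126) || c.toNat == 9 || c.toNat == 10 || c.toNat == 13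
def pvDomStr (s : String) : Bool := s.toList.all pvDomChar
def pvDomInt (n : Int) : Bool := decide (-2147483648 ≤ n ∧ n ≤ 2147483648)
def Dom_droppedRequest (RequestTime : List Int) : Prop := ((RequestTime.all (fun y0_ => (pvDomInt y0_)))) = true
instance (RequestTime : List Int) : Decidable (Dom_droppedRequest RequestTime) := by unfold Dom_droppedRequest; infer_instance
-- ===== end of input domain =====

-- B rebuilds the count dict once and aggregates the windows in a single pass over the
-- sorted distinct times with bounded backward scans, where A redoes the whole
-- aggregation (sorting + integer-range window sums) after every single request.

-- ===== PORT A =====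
-- the inner re-aggregation A runs after every request; `min(time)` is ported as
-- `(min? …).getD 0`, exact because `time` is nonempty at every call site (D just got a key)
def pvAInner (D : PySem.Dict Int Int) : Int :=
  let time := PySem.List.sorted D.keys (fun x => x) false
  time.foldl (fun drop_count i =>
    let m := (PySem.List.min? time (fun x => x)).getD 0
    drop_count
      + max (D.getD i 0 - 3) 0
      + max ((((PySem.List.pyRange (max m (i - 9)) (i + 1) 1).filter
                (fun k => D.contains k)).map (fun k => D.getD k 0)).sum - 20) 0
      + max ((((PySem.List.pyRange (max m (i - 59)) (i + 1) 1).filter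
                (fun k => D.contains k)).map (fun k => D.getD k 0)).sum - 60) 0) 0

def droppedRequest (RequestTime : List Int) : Int :=
  (RequestTime.foldl (fun (st : PySem.Dict Int Int × Int) i =>
      let D := if st.1.contains i then st.1.insert i (st.1.getD i 0 + 1) else st.1.insert i 1
      (D, pvAInner D))
    (PySem.Dict.empty, 0)).2

-- ===== PORT B =====
-- the `while k >= 0 and times[k] >= lo: s += counts[k]; k -= 1` loop; the Nat argument is k+1
def pvBScan (times counts : List Int) (lo : Int) : Nat → Int → Int
  | 0, s => s
  | k + 1, s =>
      if lo ≤ times.getD k 0 then pvBScan times counts lo k (s + counts.getD k 0) else s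

def droppedRequest_alt (RequestTime : List Int) : Int :=
  let cnt := RequestTime.foldl (fun d t => d.insert t (d.getD t 0 + 1)) PySem.Dict.empty
  let times := PySem.List.sorted cnt.keys (fun x => x) false
  let counts := times.map (fun t => cnt.getD t 0)
  (List.range times.length).foldl (fun total idx =>
    let t := times.getD idx 0
    total
      + max (counts.getD idx 0 - 3) 0
      + max (pvBScan times counts (t - 9) (idx + 1) 0 - 20) 0
      + max (pvBScan times counts (t - 59) (idx + 1) 0 - 60) 0) 0

-- ===== PRECONDITION & SPEC =====
def Spec_droppedRequest (RequestTime : List Int) (out : Int) : Prop := out = droppedRequest_alt RequestTime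
instance (RequestTime : List Int) (out : Int) : Decidable (Spec_droppedRequest RequestTime out) := by unfold Spec_droppedRequest; infer_instance

-- ===== CLAIM (what is proved, stated in full; the proofs are below) =====
def Claim_equal_droppedRequest : Prop := ∀ (RequestTime : List Int), Dom_droppedRequest RequestTime → Spec_droppedRequest RequestTime (droppedRequest RequestTime)

-- ===== LEMMAS AND PROOFS =====

-- A's dict update is the counter step
theorem pvUpd_eq (d : PySem.Dict Int Int) (i : Int) :
    (if d.contains i then d.insert i (d.getD i 0 + 1) else d.insert i 1)
      = d.insert i (d.getD i 0 + 1) := by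
  by_cases h : d.contains i = true
  · simp [h]
  · simp only [Bool.not_eq_true] at h
    simp [h, PySem.Dict.getD_of_not_contains d 0 h]

-- A's loop body, named so the induction can talk about it (defeq to the lambda in droppedRequest)
def pvAStep (st : PySem.Dict Int Int × Int) (i : Int) : PySem.Dict Int Int × Int :=
  let D := if st.1.contains i then st.1.insert i (st.1.getD i 0 + 1) else st.1.insert i 1
  (D, pvAInner D)

-- A's loop: the drop_count is recomputed from scratch each round, so only the last survives
theorem pvAFold (xs : List Int) (d : PySem.Dict Int Int) (v : Int) (hxs : xs ≠ []) :
    (xs.foldl pvAStep (d, v)).2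
      = pvAInner (xs.foldl (fun d i => d.insert i (d.getD i 0 + 1)) d) := by
  induction xs generalizing d v with
  | nil => exact absurd rfl hxs
  | cons x t ih =>
      have hstep : pvAStep (d, v) x
          = (d.insert x (d.getD x 0 + 1), pvAInner (d.insert x (d.getD x 0 + 1))) := by
        simp [pvAStep, pvUpd_eq]
      rw [List.foldl_cons, hstep, List.foldl_cons]
      by_cases ht : t = []
      · subst ht; simp
      · exact ih _ _ ht

-- the index-sum both window computations equal
def pvS (times counts : List Int) (lo : Int) (k : Nat) : Int :=
  (((List.range k).filter (fun p => decide (lo ≤ times.getD p 0))).map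
      (fun p => counts.getD p 0)).sum

-- monotonicity of a strictly sorted list, getD form
theorem pvMono {times : List Int} (hlt : times.Pairwise (· < ·))
    {p q : Nat} (hpq : p ≤ q) (hq : q < times.length) :
    times.getD p 0 ≤ times.getD q 0 := by
  rcases eq_or_lt_of_le hpq with rfl | h
  · exact le_refl _
  · have := (List.pairwise_iff_getElem.mp hlt) p q (lt_of_le_of_lt hpq hq) hq h
    rw [List.getD_eq_getElem _ _ (lt_of_le_of_lt hpq hq), List.getD_eq_getElem _ _ hq]
    exact le_of_lt this

theorem pvBScan_eq (times counts : List Int) (lo : Int)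
    (hlt : times.Pairwise (· < ·)) :
    ∀ k, k ≤ times.length → ∀ s, pvBScan times counts lo k s = s + pvS times counts lo k := by
  intro k
  induction k with
  | zero => intro _ s; simp [pvBScan, pvS]
  | succ k ih =>
      intro hk s
      have hklen : k < times.length := hk
      by_cases h : lo ≤ times.getD k 0
      · rw [pvBScan, if_pos h, ih (le_of_lt hklen) (s + counts.getD k 0)]
        have h' : decide (lo ≤ times.getD k 0) = true := decide_eq_true h
        simp only [pvS, List.range_succ, List.filter_append, List.map_append, List.sum_append,
          List.filter_cons, List.filter_nil, h', if_true]
        simp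
        ring
      · rw [pvBScan, if_neg h]
        have hzero : pvS times counts lo (k + 1) = 0 := by
          unfold pvS
          have hnil : ((List.range (k + 1)).filter (fun p => decide (lo ≤ times.getD p 0))) = [] := by
            apply List.filter_eq_nil_iff.mpr
            intro p hp
            have hpk : p ≤ k := Nat.lt_succ_iff.mp (List.mem_range.mp hp)
            have := pvMono hlt hpk hklen
            simp only [decide_eq_true_eq]
            omega
          rw [hnil]; simp
        omega

-- the two window sums agree: A's integer-range sum over the dict = B's backward index scan
theorem pvWindow_eq (D : PySem.Dict Int Int) (times counts : List Int)
    (htimes : times = PySem.List.sorted D.keys (fun x => x) false)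
    (hlt : times.Pairwise (· < ·))
    (hcounts : counts = times.map (fun t => D.getD t 0))
    (j : Nat) (hj : j < times.length) (lo m : Int)
    (hm : PySem.List.min? times (fun x => x) = some m) :
    (((PySem.List.pyRange (max m lo) (times.getD j 0 + 1) 1).filter
        (fun k => D.contains k)).map (fun k => D.getD k 0)).sum
      = pvBScan times counts lo (j + 1) 0 := by
  have hmin : ∀ x ∈ times, m ≤ x := fun x hx => PySem.List.min?_isMin hm x hx
  have hmemtimes : ∀ x, D.contains x = true ↔ x ∈ times := by
    intro x
    rw [PySem.Dict.contains_iff_mem_keys, htimes, PySem.List.mem_sorted]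
  have hinj : ∀ p q, p < times.length → q < times.length →
      times.getD p 0 = times.getD q 0 → p = q := by
    intro p q hp hq hpq
    by_contra hne
    rcases Nat.lt_or_ge p q with hlt' | hge
    · have := pvMono hlt (Nat.succ_le_of_lt hlt') hq
      have h2 := pvMono hlt (le_refl p) hp
      have h3 := (List.pairwise_iff_getElem.mp hlt) p q hp hq hlt'
      rw [List.getD_eq_getElem _ _ hp, List.getD_eq_getElem _ _ hq] at hpq
      omega
    · have hqp : q < p := lt_of_le_of_ne hge (fun h => hne h.symm)
      have h3 := (List.pairwise_iff_getElem.mp hlt) q p hq hp hqp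
      rw [List.getD_eq_getElem _ _ hp, List.getD_eq_getElem _ _ hq] at hpq
      omega
  set t := times.getD j 0 with ht
  set Alist := (PySem.List.pyRange (max m lo) (t + 1) 1).filter (fun k => D.contains k) with hA
  set Ilist := ((List.range (j + 1)).filter (fun p => decide (lo ≤ times.getD p 0))).map
      (fun p => times.getD p 0) with hI
  have hperm : Alist.Perm Ilist := by
    rw [List.perm_ext_iff_of_nodup]
    · intro x
      rw [hA, hI]
      simp only [List.mem_filter, PySem.List.mem_pyRange_one, List.mem_map, List.mem_range,
        decide_eq_true_eq, Nat.lt_succ_iff]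
      constructor
      · rintro ⟨⟨hlox, hxt⟩, hcont⟩
        have hxtimes : x ∈ times := (hmemtimes x).mp hcont
        obtain ⟨p, hp, hxp⟩ := List.mem_iff_getElem.mp hxtimes
        have hxp' : times.getD p 0 = x := by rw [List.getD_eq_getElem _ _ hp]; exact hxp
        refine ⟨p, ⟨?_, ?_⟩, hxp'⟩
        · by_contra hjp
          have hjp' : j < p := Nat.lt_of_not_le hjp
          have := (List.pairwise_iff_getElem.mp hlt) j p hj hp hjp'
          rw [hxp] at this
          have htj : t = times[j] := List.getD_eq_getElem _ _ hj
          omega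
        · rw [hxp']
          exact le_trans (le_max_right m lo) hlox
      · rintro ⟨p, ⟨hpj, hplo⟩, hxp⟩
        have hp : p < times.length := lt_of_le_of_lt hpj hj
        have hxtimes : x ∈ times := by
          rw [← hxp, List.getD_eq_getElem _ _ hp]; exact List.getElem_mem hp
        have hxle : x ≤ t := by rw [← hxp]; exact pvMono hlt hpj hj
        refine ⟨⟨max_le (hmin x hxtimes) (by rw [← hxp]; exact hplo), by omega⟩,
          (hmemtimes x).mpr hxtimes⟩
    · exact (PySem.List.nodup_pyRange_one _ _).filter _
    · apply List.Nodup.map_on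
      · intro p hp q hq hpq
        have hp' : p < times.length := lt_of_le_of_lt (Nat.lt_succ_iff.mp (List.mem_range.mp (List.mem_of_mem_filter hp))) hj
        have hq' : q < times.length := lt_of_le_of_lt (Nat.lt_succ_iff.mp (List.mem_range.mp (List.mem_of_mem_filter hq))) hj
        exact hinj p q hp' hq' hpq
      · exact List.Nodup.filter _ (List.nodup_range)
  calc (Alist.map (fun k => D.getD k 0)).sum
      = (Ilist.map (fun k => D.getD k 0)).sum := (hperm.map _).sum_eq
    _ = pvS times counts lo (j + 1) := by
        rw [hI, List.map_map, pvS]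
        apply congrArg
        apply List.map_congr_left
        intro p hp
        have hp' : p < times.length := lt_of_le_of_lt (Nat.lt_succ_iff.mp (List.mem_range.mp (List.mem_of_mem_filter hp))) hj
        simp only [Function.comp_apply]
        have hmapD : counts.getD p 0 = D.getD times[p] 0 := by
          rw [hcounts, List.getD_eq_getElem _ _ (by simpa using hp')]
          simp
        rw [hmapD, List.getD_eq_getElem _ _ hp']
    _ = pvBScan times counts lo (j + 1) 0 := by
        rw [pvBScan_eq times counts lo hlt (j + 1) hj 0, zero_add]

-- every Python for-loop here adds three terms; fold-of-additions is a sum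
theorem pvFoldlAdd3 {α : Type} (l : List α) (a b c : α → Int) (init : Int) :
    l.foldl (fun acc x => acc + a x + b x + c x) init
      = init + (l.map (fun x => a x + b x + c x)).sum := by
  induction l generalizing init with
  | nil => simp
  | cons x t ih => simp only [List.foldl_cons, List.map_cons, List.sum_cons, ih]; ring

-- the single aggregation over the final dict: A's inner pass equals B's pass
theorem pvInner_eq (D : PySem.Dict Int Int)
    (hlt : (PySem.List.sorted D.keys (fun x => x) false).Pairwise (· < ·)) :
    pvAInner D
      = (List.range (PySem.List.sorted D.keys (fun x => x) false).length).foldl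
          (fun total idx =>
            let t := (PySem.List.sorted D.keys (fun x => x) false).getD idx 0
            total
              + max (((PySem.List.sorted D.keys (fun x => x) false).map
                       (fun t => D.getD t 0)).getD idx 0 - 3) 0
              + max (pvBScan (PySem.List.sorted D.keys (fun x => x) false)
                       ((PySem.List.sorted D.keys (fun x => x) false).map (fun t => D.getD t 0))
                       (t - 9) (idx + 1) 0 - 20) 0
              + max (pvBScan (PySem.List.sorted D.keys (fun x => x) false)
                       ((PySem.List.sorted D.keys (fun x => x) false).map (fun t => D.getD t 0))
                       (t - 59) (idx + 1) 0 - 60) 0) 0 := by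
  set L := PySem.List.sorted D.keys (fun x => x) false with hL
  by_cases hnil : L = []
  · rw [pvAInner]
    simp only [← hL, hnil]
    simp
  · obtain ⟨m, hm⟩ : ∃ m, PySem.List.min? L (fun x => x) = some m := by
      cases hmm : PySem.List.min? L (fun x => x) with
      | none => exact absurd ((PySem.List.min?_eq_none_iff _ _).mp hmm) hnil
      | some m => exact ⟨m, rfl⟩
    rw [pvAInner]
    simp only [← hL, hm, Option.getD_some]
    rw [pvFoldlAdd3, pvFoldlAdd3, zero_add, zero_add]
    apply congrArg
    apply List.ext_getElem
    · simp
    · intro j hj hj'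
      have hjL : j < L.length := by simpa using hj
      simp only [List.getElem_map, List.getElem_range]
      have hgetD : L.getD j 0 = L[j] := List.getD_eq_getElem _ _ hjL
      have hw9 := pvWindow_eq D L (L.map (fun t => D.getD t 0)) hL hlt rfl j hjL (L.getD j 0 - 9) m hm
      have hw59 := pvWindow_eq D L (L.map (fun t => D.getD t 0)) hL hlt rfl j hjL (L.getD j 0 - 59) m hm
      rw [hgetD] at hw9 hw59
      have hcnt : (L.map (fun t => D.getD t 0)).getD j 0 = D.getD L[j] 0 := by
        rw [List.getD_eq_getElem _ _ (by simpa using hjL), List.getElem_map]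
      rw [hgetD, hcnt, ← hw9, ← hw59]

theorem pvMain (xs : List Int) : droppedRequest xs = droppedRequest_alt xs := by
  by_cases hnil : xs = []
  · subst hnil; decide
  · have hcounter : xs.foldl (fun d t => d.insert t (d.getD t 0 + 1)) PySem.Dict.empty
        = PySem.Dict.counter xs := PySem.Dict.foldl_insert_getD_add_one_eq_counter xs
    have hlt : (PySem.List.sorted (PySem.Dict.counter xs).keys (fun x => x) false).Pairwise (· < ·) := by
      rw [PySem.Dict.keys_counter]
      exact PySem.List.sorted_ofList_pairwise_lt xs
    have hA : droppedRequest xs = pvAInner (PySem.Dict.counter xs) := by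
      show (xs.foldl pvAStep (PySem.Dict.empty, 0)).2 = _
      rw [pvAFold xs _ _ hnil, hcounter]
    rw [hA, pvInner_eq _ hlt]
    simp only [droppedRequest_alt, hcounter]

-- ===== VERDICT (by name: the statement is the Claim_ definition above) =====
theorem droppedRequest_spec : Claim_equal_droppedRequest := by
  intro xs _
  unfold Spec_droppedRequest
  exact pvMain xs
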